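-- pv_equiv track=rewrite | github.com/lthurman-skyhigh/Boggle-All-Materials | Task 03/Task_03_solution.py | valid_word_solution
-- ===== SOURCE A (Python) =====
-- def valid_word_solution(word: str):
--     contains_a_vowel = False
--     vowels = ["a", "e", "i", "o", "u", "y"]
--
--     for letter in word:
--
--         if not 97<=ord(letter)<=122:
--             return False
--
--         if letter in vowels:
--             contains_a_vowel = True
--
--     return len(word) >= 3 and contains_a_vowel
-- ===== SOURCE B (Python) =====
-- def valid_word_solution(word: str):
--     s = set(word)
--     return len(word) >= 3 and s <= set("abcdefghijklmnopqrstuvwxyz") and bool(s & set("aeiouy"))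
-- ===== Notes on version B (the rewrite author's own statement) =====
-- stated objective: simpler
-- what changed: Replaces A's per-character loop with early return, ord-range check and vowel flag by a single set construction plus set algebra: a subset test against the a-z set for validity and an intersection with the vowel set for vowel presence.
import Mathlib
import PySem

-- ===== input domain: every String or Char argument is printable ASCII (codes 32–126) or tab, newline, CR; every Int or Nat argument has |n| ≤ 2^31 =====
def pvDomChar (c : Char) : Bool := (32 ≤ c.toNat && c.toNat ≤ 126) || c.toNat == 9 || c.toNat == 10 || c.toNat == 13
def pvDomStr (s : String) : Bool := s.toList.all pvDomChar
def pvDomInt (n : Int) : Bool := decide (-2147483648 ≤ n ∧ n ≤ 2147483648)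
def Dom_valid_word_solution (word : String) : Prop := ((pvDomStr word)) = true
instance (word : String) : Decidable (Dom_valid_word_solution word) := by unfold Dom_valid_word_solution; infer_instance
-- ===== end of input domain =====

-- B replaces A's character loop (early return + vowel flag) by set algebra (subset test + intersection); simpler, same cost.

-- ===== PORT A =====
def vwsVowels : List Char := ['a', 'e', 'i', 'o', 'u', 'y']

-- the 'for letter in word' loop: early return False on a non-a-z char, else accumulate the vowel flag
def vwsLoop (word : String) : List Char → Bool → Bool
  | [], contains_a_vowel => decide ((3 : Int) ≤ PySem.Str.len word) && contains_a_vowel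
  | letter :: rest, contains_a_vowel =>
    if ¬ (97 ≤ letter.toNat ∧ letter.toNat ≤ 122) then false
    else vwsLoop word rest (contains_a_vowel || vwsVowels.contains letter)

def valid_word_solution (word : String) : Bool := vwsLoop word word.toList false

-- ===== PORT B =====
def vwsAZ : List Char :=
  ['a','b','c','d','e','f','g','h','i','j','k','l','m','n','o','p','q','r','s','t','u','v','w','x','y','z']

def valid_word_solution_alt (word : String) : Bool :=
  let s : PySem.Set Char := PySem.Set.ofList word.toList
  decide ((3 : Int) ≤ PySem.Str.len word)
    && PySem.Set.issubset s (PySem.Set.ofList vwsAZ)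
    && !(PySem.Set.inter s (PySem.Set.ofList vwsVowels)).isEmpty

-- ===== PRECONDITION & SPEC =====
def Spec_valid_word_solution (word : String) (out : Bool) : Prop := out = valid_word_solution_alt word
instance (word : String) (out : Bool) : Decidable (Spec_valid_word_solution word out) := by unfold Spec_valid_word_solution; infer_instance

-- ===== CLAIM (what is proved, stated in full; the proofs are below) =====
def Claim_equal_valid_word_solution : Prop := ∀ (word : String), Dom_valid_word_solution word → Spec_valid_word_solution word (valid_word_solution word)

-- ===== LEMMAS AND PROOFS =====

theorem vws_az_toNat : vwsAZ.map Char.toNat =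
    [97,98,99,100,101,102,103,104,105,106,107,108,109,110,111,112,113,114,115,116,117,118,119,120,121,122] := by
  decide

-- a character's membership in the a-z literal list is the ord-range test of A
theorem vws_mem_az (c : Char) : c ∈ vwsAZ ↔ (97 ≤ c.toNat ∧ c.toNat ≤ 122) := by
  constructor
  · intro h
    have h2 : c.toNat ∈ vwsAZ.map Char.toNat := List.mem_map_of_mem h
    rw [vws_az_toNat] at h2
    simp only [List.mem_cons, List.not_mem_nil, or_false] at h2
    omega
  · intro h
    have h2 : c.toNat ∈ vwsAZ.map Char.toNat := by
      rw [vws_az_toNat]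
      simp only [List.mem_cons, List.not_mem_nil, or_false]
      omega
    rcases List.mem_map.mp h2 with ⟨d, hd, hdc⟩
    have h3 : d.val.toNat = c.val.toNat := hdc
    have : d = c := Char.ext (UInt32.toNat_inj.mp h3)
    exact this ▸ hd

theorem vws_loop_eq (word : String) (l : List Char) (v : Bool) :
    vwsLoop word l v =
      (decide ((3 : Int) ≤ PySem.Str.len word)
        && l.all (fun c => decide (97 ≤ c.toNat ∧ c.toNat ≤ 122))
        && (v || l.any (fun c => vwsVowels.contains c))) := by
  induction l generalizing v with
  | nil => simp [vwsLoop]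
  | cons c rest ih =>
    by_cases h : (97 ≤ c.toNat ∧ c.toNat ≤ 122)
    · simp [vwsLoop, h, ih, Bool.or_assoc]
    · simp [vwsLoop, h]

theorem vws_alt_eq (word : String) :
    valid_word_solution_alt word =
      (decide ((3 : Int) ≤ PySem.Str.len word)
        && word.toList.all (fun c => decide (97 ≤ c.toNat ∧ c.toNat ≤ 122))
        && word.toList.any (fun c => vwsVowels.contains c)) := by
  rw [valid_word_solution_alt]
  congr 1
  · congr 1
    rw [Bool.eq_iff_iff, List.all_eq_true]
    constructor
    · intro hs c hc
      have h2 := (PySem.Set.issubset_iff _ _).mp hs c ((PySem.Set.mem_ofList _ _).mpr hc)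
      exact decide_eq_true ((vws_mem_az c).mp ((PySem.Set.mem_ofList _ _).mp h2))
    · intro h
      apply (PySem.Set.issubset_iff _ _).mpr
      intro x hx
      exact (PySem.Set.mem_ofList _ _).mpr ((vws_mem_az x).mpr
        (of_decide_eq_true (h x ((PySem.Set.mem_ofList _ _).mp hx))))
  · by_cases hv : ∃ c, c ∈ word.toList ∧ c ∈ vwsVowels
    · rcases hv with ⟨c, hc1, hc2⟩
      have h1 : (word.toList.any fun c => vwsVowels.contains c) = true :=
        List.any_eq_true.mpr ⟨c, hc1, by simpa using hc2⟩
      have hmem : c ∈ (PySem.Set.ofList word.toList).inter (PySem.Set.ofList vwsVowels) :=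
        (PySem.Set.mem_inter _ _ _).mpr
          ⟨(PySem.Set.mem_ofList _ _).mpr hc1, (PySem.Set.mem_ofList _ _).mpr hc2⟩
      have hne := List.ne_nil_of_mem hmem
      rw [h1]
      cases hI : (PySem.Set.ofList word.toList).inter (PySem.Set.ofList vwsVowels) with
      | nil => exact absurd hI hne
      | cons a t => rfl
    · push Not at hv
      have h1 : (word.toList.any fun c => vwsVowels.contains c) = false := by
        rw [List.any_eq_false]
        intro c hc
        simpa using hv c hc
      have hnil : (PySem.Set.ofList word.toList).inter (PySem.Set.ofList vwsVowels) = [] := by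
        refine List.eq_nil_iff_forall_not_mem.mpr (fun c hcm => ?_)
        have h2 := (PySem.Set.mem_inter _ _ _).mp hcm
        exact hv c ((PySem.Set.mem_ofList _ _).mp h2.1) ((PySem.Set.mem_ofList _ _).mp h2.2)
      rw [h1, hnil]
      rfl

-- ===== VERDICT (by name: the statement is the Claim_ definition above) =====
theorem valid_word_solution_spec : Claim_equal_valid_word_solution := by
  intro word _
  unfold Spec_valid_word_solution
  show valid_word_solution word = valid_word_solution_alt word
  rw [valid_word_solution, vws_loop_eq, vws_alt_eq, Bool.false_or]
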